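-- pv_equiv track=rewrite | github.com/chad-deng/ai-api--automation | src/git/conflict_resolver.py | _apply_resolution_strategy
-- ===== SOURCE A (Python) =====
-- from typing import List, Dict, Any, Optional, Tuple
--
-- class ConflictResolution:
--     ACCEPT_CURRENT = "accept_current"
--     ACCEPT_INCOMING = "accept_incoming"
--     MANUAL = "manual"
--     AUTO_MERGE = "auto_merge"
--     SKIP = "skip"
--
-- def _apply_resolution_strategy(
--
--     content: str,
--     conflict: Dict[str, Any],
--     strategy: str
-- ) -> str:
--     """Apply resolution strategy to file content"""
--     if not any(marker in content for marker in ['<<<<<<<', '=======', '>>>>>>>']):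
--         return content
--
--     lines = content.split('\n')
--     resolved_lines = []
--     i = 0
--
--     while i < len(lines):
--         line = lines[i]
--
--         if line.strip().startswith('<<<<<<<'):
--             # Find conflict section boundaries
--             separator_idx = None
--             end_idx = None
--
--             for j in range(i + 1, len(lines)):
--                 if lines[j].strip() == '=======':
--                     separator_idx = j
--                 elif lines[j].strip().startswith('>>>>>>>'):
--                     end_idx = j
--                     break
--
--             if separator_idx is not None and end_idx is not None:
--                 current_section = lines[i+1:separator_idx]
--                 incoming_section = lines[separator_idx+1:end_idx]
--
--                 # Apply strategy
--                 if strategy == ConflictResolution.ACCEPT_CURRENT: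
--                     resolved_lines.extend(current_section)
--                 elif strategy == ConflictResolution.ACCEPT_INCOMING:
--                     resolved_lines.extend(incoming_section)
--                 elif strategy == ConflictResolution.AUTO_MERGE:
--                     # Simple merge: combine non-overlapping changes
--                     resolved_lines.extend(current_section)
--                     resolved_lines.extend(incoming_section)
--                 else:
--                     # Keep conflict markers for manual resolution
--                     resolved_lines.extend(lines[i:end_idx+1])
--
--                 i = end_idx + 1
--             else:
--                 resolved_lines.append(line)
--                 i += 1
--         else:
--             resolved_lines.append(line)
--             i += 1
--
--     return '\n'.join(resolved_lines)
-- ===== SOURCE B (Python) =====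
-- def _split_at_start(lines):
--     """Split at the first conflict-start marker: (before, marker_line, after)."""
--     for k in range(len(lines)):
--         if lines[k].strip().startswith('<<<<<<<'):
--             return lines[:k], lines[k], lines[k+1:]
--     return None
--
--
-- def _split_at_end(lines):
--     """Split at the first conflict-end marker: (before, marker_line, after)."""
--     for k in range(len(lines)):
--         if lines[k].strip().startswith('>>>>>>>'):
--             return lines[:k], lines[k], lines[k+1:]
--     return None
--
--
-- def _split_at_last_sep(lines):
--     """Split at the last '=======' line: (before, after)."""
--     for k in range(len(lines) - 1, -1, -1):
--         if lines[k].strip() == '=======':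
--             return lines[:k], lines[k+1:]
--     return None
--
--
-- def _apply_resolution_strategy(content, conflict, strategy):
--     """Apply resolution strategy by repeatedly splitting off the next conflict block."""
--     if not any(marker in content for marker in ['<<<<<<<', '=======', '>>>>>>>']):
--         return content
--
--     out = []
--     rest = content.split('\n')
--     while True:
--         start = _split_at_start(rest)
--         if start is None:
--             out += rest
--             break
--         before, head, tail = start
--         out += before
--         block = _split_at_end(tail)
--         sep = _split_at_last_sep(block[0]) if block is not None else None
--         if sep is None:
--             out.append(head)
--             rest = tail
--         else:
--             body, endline, after = block
--             current, incoming = sep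
--             if strategy == "accept_current":
--                 out += current
--             elif strategy == "accept_incoming":
--                 out += incoming
--             elif strategy == "auto_merge":
--                 out += current + incoming
--             else:
--                 out += [head] + body + [endline]
--             rest = after
--     return '\n'.join(out)
-- ===== Notes on version B (the rewrite author's own statement) =====
-- stated objective: alternative
-- what changed: Replaces A's index-based while loop (with an inner forward index rescan per conflict) by a segment decomposition: the line list is repeatedly split at the next start marker, at the first end marker after it, and at the last separator in between, each split returning list pieces instead of indices; output is assembled segment by segment.
import Mathlib
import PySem

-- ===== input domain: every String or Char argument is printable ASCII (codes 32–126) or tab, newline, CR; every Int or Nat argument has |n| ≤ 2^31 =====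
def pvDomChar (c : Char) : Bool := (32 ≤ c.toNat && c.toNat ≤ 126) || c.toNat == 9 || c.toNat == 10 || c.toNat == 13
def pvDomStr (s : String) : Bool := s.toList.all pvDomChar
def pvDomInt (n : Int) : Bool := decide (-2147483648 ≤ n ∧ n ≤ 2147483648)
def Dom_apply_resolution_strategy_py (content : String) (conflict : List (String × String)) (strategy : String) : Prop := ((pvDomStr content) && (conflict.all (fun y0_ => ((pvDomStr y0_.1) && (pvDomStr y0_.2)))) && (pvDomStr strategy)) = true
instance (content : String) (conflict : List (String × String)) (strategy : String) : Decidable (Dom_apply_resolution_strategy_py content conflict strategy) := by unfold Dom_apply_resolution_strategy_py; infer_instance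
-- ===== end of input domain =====

-- B replaces A's index-based while loop (inner forward rescan per conflict) by a segment
-- decomposition built from three list-splitting helpers; return value only, no mutation.

-- shared line predicates (the three marker tests both Pythons write inline)
def pvIsStart (l : String) : Bool := PySem.Str.startswith (PySem.Str.strip l) "<<<<<<<"
def pvIsSep (l : String) : Bool := PySem.Str.strip l == "======="
def pvIsEnd (l : String) : Bool := PySem.Str.startswith (PySem.Str.strip l) ">>>>>>>"

-- ===== PORT A =====
-- inner 'for j in range(i+1, len(lines))' scan: updates separator_idx, breaks at the first end marker.
-- List.range' a m = range(a, a+m) on the (nonnegative) Nat indices this loop uses.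
def pvScanA (lines : List String) : List Nat → Option Nat → Option Nat × Option Nat
  | [], sep => (sep, none)
  | j :: rest, sep =>
    let line := lines.getD j ""
    if pvIsSep line then pvScanA lines rest (some j)
    else if pvIsEnd line then (sep, some j)
    else pvScanA lines rest sep

-- the 'while i < len(lines)' loop; fuel = len(lines) suffices since i strictly increases.
def pvLoopA (strategy : String) (lines : List String) : Nat → Nat → List String → List String
  | 0, _, acc => acc
  | fuel+1, i, acc =>
    if i < lines.length then
      let line := lines.getD i ""
      if pvIsStart line then
        match pvScanA lines (List.range' (i+1) (lines.length - (i+1))) none with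
        | (some s, some e) =>
          -- lines[a:b] on the nonnegative in-order bounds used here = (drop a).take (b-a)
          let cur := (lines.drop (i+1)).take (s - (i+1))
          let inc := (lines.drop (s+1)).take (e - (s+1))
          let acc' :=
            if strategy == "accept_current" then acc ++ cur
            else if strategy == "accept_incoming" then acc ++ inc
            else if strategy == "auto_merge" then acc ++ cur ++ inc
            else acc ++ ((lines.drop i).take (e+1 - i))
          pvLoopA strategy lines fuel (e+1) acc'
        | (_, _) => pvLoopA strategy lines fuel (i+1) (acc ++ [line])
      else pvLoopA strategy lines fuel (i+1) (acc ++ [line])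
    else acc

def apply_resolution_strategy_py (content : String) (conflict : List (String × String)) (strategy : String) : String :=
  if !(["<<<<<<<", "=======", ">>>>>>>"].any (fun m => PySem.Str.isIn m content)) then content
  else
    let lines := (PySem.Str.split? content "\n").getD []   -- sep "\n" ≠ "": split? is never none
    PySem.Str.join "\n" (pvLoopA strategy lines lines.length 0 [])

-- ===== PORT B =====
-- _split_at_start: split the list at the first start-marker line (before, marker, after)
def pvSplitStart : List String → Option (List String × String × List String)
  | [] => none
  | l :: rest =>
    if pvIsStart l then some ([], l, rest)
    else (pvSplitStart rest).map (fun p => (l :: p.1, p.2.1, p.2.2))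

-- _split_at_end: split the list at the first end-marker line (before, marker, after)
def pvSplitEnd : List String → Option (List String × String × List String)
  | [] => none
  | l :: rest =>
    if pvIsEnd l then some ([], l, rest)
    else (pvSplitEnd rest).map (fun p => (l :: p.1, p.2.1, p.2.2))

-- _split_at_last_sep: split the list at the LAST separator line (before, after)
def pvSplitSep : List String → Option (List String × List String)
  | [] => none
  | l :: rest =>
    match pvSplitSep rest with
    | some p => some (l :: p.1, p.2)
    | none => if pvIsSep l then some ([], rest) else none

-- length facts the recursion of pvGoB cites for termination
lemma pvSplitStart_len (xs : List String) :
    ∀ b h t, pvSplitStart xs = some (b, h, t) → b.length + 1 + t.length = xs.length := by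
  induction xs with
  | nil => intro b h t hs; simp [pvSplitStart] at hs
  | cons l rest ih =>
    intro b h t hs
    rw [pvSplitStart] at hs
    split at hs
    · simp at hs; obtain ⟨hb, -, ht⟩ := hs; subst hb; subst ht; simp; omega
    · cases hr : pvSplitStart rest with
      | none => rw [hr] at hs; simp at hs
      | some p =>
        obtain ⟨b', h', t'⟩ := p
        rw [hr] at hs; simp at hs
        obtain ⟨hb, hh, ht⟩ := hs
        have := ih b' h' t' hr
        subst hb; subst ht; simp; omega

lemma pvSplitEnd_len (xs : List String) :
    ∀ b h t, pvSplitEnd xs = some (b, h, t) → b.length + 1 + t.length = xs.length := by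
  induction xs with
  | nil => intro b h t hs; simp [pvSplitEnd] at hs
  | cons l rest ih =>
    intro b h t hs
    rw [pvSplitEnd] at hs
    split at hs
    · simp at hs; obtain ⟨hb, -, ht⟩ := hs; subst hb; subst ht; simp; omega
    · cases hr : pvSplitEnd rest with
      | none => rw [hr] at hs; simp at hs
      | some p =>
        obtain ⟨b', h', t'⟩ := p
        rw [hr] at hs; simp at hs
        obtain ⟨hb, hh, ht⟩ := hs
        have := ih b' h' t' hr
        subst hb; subst ht; simp; omega

-- Source B's main 'while True' loop, as the obvious recursion on the remaining segment
def pvGoB (strategy : String) (lines : List String) : List String :=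
  match h1 : pvSplitStart lines with
  | none => lines
  | some (before, head, tail) =>
    match h2 : pvSplitEnd tail with
    | none => before ++ head :: pvGoB strategy tail
    | some (body, endl, after) =>
      match pvSplitSep body with
      | none => before ++ head :: pvGoB strategy tail
      | some (cur, inc) =>
        let chunk :=
          if strategy == "accept_current" then cur
          else if strategy == "accept_incoming" then inc
          else if strategy == "auto_merge" then cur ++ inc
          else head :: body ++ [endl]
        before ++ chunk ++ pvGoB strategy after
termination_by lines.length
decreasing_by
  · have := pvSplitStart_len lines _ _ _ h1; omega
  · have := pvSplitStart_len lines _ _ _ h1; omega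
  · have := pvSplitStart_len lines _ _ _ h1; have := pvSplitEnd_len tail _ _ _ h2; omega

def apply_resolution_strategy_py_alt (content : String) (conflict : List (String × String)) (strategy : String) : String :=
  if !(["<<<<<<<", "=======", ">>>>>>>"].any (fun m => PySem.Str.isIn m content)) then content
  else
    let lines := (PySem.Str.split? content "\n").getD []   -- sep "\n" ≠ "": split? is never none
    PySem.Str.join "\n" (pvGoB strategy lines)

-- ===== PRECONDITION & SPEC =====
def Spec_apply_resolution_strategy_py (content : String) (conflict : List (String × String)) (strategy : String) (out : String) : Prop := out = apply_resolution_strategy_py_alt content conflict strategy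
instance (content : String) (conflict : List (String × String)) (strategy : String) (out : String) : Decidable (Spec_apply_resolution_strategy_py content conflict strategy out) := by unfold Spec_apply_resolution_strategy_py; infer_instance

-- ===== CLAIM (what is proved, stated in full; the proofs are below) =====
def Claim_equal_apply_resolution_strategy_py : Prop := ∀ (content : String) (conflict : List (String × String)) (strategy : String), Dom_apply_resolution_strategy_py content conflict strategy → Spec_apply_resolution_strategy_py content conflict strategy (apply_resolution_strategy_py content conflict strategy)

-- ===== LEMMAS AND PROOFS =====

-- spec of A's inner scan: least end-marker index ≥ j
def pvFirstEnd (lines : List String) (j : Nat) : Option Nat :=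
  if h : j < lines.length then
    if pvIsEnd (lines.getD j "") then some j else pvFirstEnd lines (j+1)
  else none
termination_by lines.length - j

-- spec of A's separator variable: greatest separator index < b
def pvLastSep (lines : List String) : Nat → Option Nat
  | 0 => none
  | b+1 => if pvIsSep (lines.getD b "") then some b else pvLastSep lines b

lemma pvFirstEnd_bounds {lines : List String} {j e : Nat} (h : pvFirstEnd lines j = some e) :
    j ≤ e ∧ e < lines.length := by
  fun_induction pvFirstEnd lines j with
  | case1 j hj hEnd => simp at h; omega
  | case2 j hj hEnd ih => have := ih h; omega
  | case3 j hj => simp at h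

lemma pvLastSep_lt {lines : List String} {b s : Nat} (h : pvLastSep lines b = some s) : s < b := by
  induction b with
  | zero => simp [pvLastSep] at h
  | succ b ih =>
    rw [pvLastSep] at h
    split at h
    · simp at h; omega
    · have := ih h; omega

lemma pvLastSep_isSep {lines : List String} {b s : Nat} (h : pvLastSep lines b = some s) :
    pvIsSep (lines.getD s "") = true := by
  induction b with
  | zero => simp [pvLastSep] at h
  | succ b ih =>
    rw [pvLastSep] at h
    split at h
    · simp at h; subst h; assumption
    · exact ih h

lemma pvLastSep_of_isSep {lines : List String} {a b : Nat}
    (hsep : pvIsSep (lines.getD a "") = true) (hab : a < b) :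
    ∃ s, pvLastSep lines b = some s ∧ a ≤ s := by
  induction b with
  | zero => omega
  | succ b ih =>
    rw [pvLastSep]
    by_cases hb : pvIsSep (lines.getD b "")
    · exact ⟨b, by rw [if_pos hb], by omega⟩
    · rw [if_neg hb]
      have hne : a ≠ b := fun he => hb (he ▸ hsep)
      exact ih (by omega)

lemma pv_sep_not_end {l : String} (h : pvIsSep l = true) : pvIsEnd l = false := by
  unfold pvIsSep at h
  unfold pvIsEnd
  rw [eq_of_beq h]
  decide

lemma pvScanA_spec (lines : List String) :
    ∀ (m a : Nat) (sep0 : Option Nat), a + m = lines.length →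
    pvScanA lines (List.range' a m) sep0 =
      ((match pvLastSep lines ((pvFirstEnd lines a).getD lines.length) with
        | some s => if a ≤ s then some s else sep0
        | none => sep0),
       pvFirstEnd lines a) := by
  have hfeU : ∀ j, j < lines.length →
      pvFirstEnd lines j = if pvIsEnd (lines.getD j "") then some j else pvFirstEnd lines (j+1) := by
    intro j h
    rw [pvFirstEnd, dif_pos h]
  intro m
  induction m with
  | zero =>
    intro a sep0 ha
    have hfe : pvFirstEnd lines a = none := by rw [pvFirstEnd]; rw [dif_neg (by omega)]
    rw [hfe]
    simp only [List.range'_zero, pvScanA, Option.getD_none]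
    cases h : pvLastSep lines lines.length with
    | none => rfl
    | some s =>
      have := pvLastSep_lt h
      simp [show ¬ a ≤ s by omega]
  | succ m ih =>
    intro a sep0 ha
    rw [List.range'_succ]
    rw [pvScanA]
    have haL : a < lines.length := by omega
    by_cases hsep : pvIsSep (lines.getD a "")
    · rw [if_pos hsep]
      rw [ih (a+1) (some a) (by omega)]
      have hfe : pvFirstEnd lines a = pvFirstEnd lines (a+1) := by
        rw [hfeU a haL, if_neg (by rw [pv_sep_not_end hsep]; simp)]
      rw [← hfe]
      have hb : a < (pvFirstEnd lines a).getD lines.length := by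
        cases h : pvFirstEnd lines a with
        | none => simpa using haL
        | some e =>
          have := pvFirstEnd_bounds (hfe ▸ h)
          simpa using (by omega : a < e)
      obtain ⟨s, hs, has⟩ := pvLastSep_of_isSep hsep hb
      rw [hs]
      rcases Nat.lt_or_ge s (a+1) with h1 | h1
      · simp [show s = a by omega]
      · simp [show a + 1 ≤ s from h1, show a ≤ s by omega]
    · rw [if_neg hsep]
      by_cases hend : pvIsEnd (lines.getD a "")
      · rw [if_pos hend]
        have hfe : pvFirstEnd lines a = some a := by
          rw [hfeU a haL, if_pos hend]
        rw [hfe]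
        simp only [Option.getD_some]
        cases h : pvLastSep lines a with
        | none => rfl
        | some s =>
          have := pvLastSep_lt h
          simp [show ¬ a ≤ s by omega]
      · rw [if_neg hend]
        rw [ih (a+1) sep0 (by omega)]
        have hfe : pvFirstEnd lines a = pvFirstEnd lines (a+1) := by
          rw [hfeU a haL, if_neg hend]
        rw [← hfe]
        cases h : pvLastSep lines ((pvFirstEnd lines a).getD lines.length) with
        | none => rfl
        | some s =>
          have hss := pvLastSep_isSep h
          have hne : s ≠ a := fun he => hsep (he ▸ hss)
          rcases Nat.lt_or_ge s a with h1 | h1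
          · simp [show ¬ a + 1 ≤ s by omega, show ¬ a ≤ s by omega]
          · simp [show a + 1 ≤ s by omega, show a ≤ s by omega]

-- drop i = lines[i] :: drop (i+1), with getD on the left
lemma pv_drop_cons {lines : List String} {i : Nat} (h : i < lines.length) :
    lines.drop i = lines.getD i "" :: lines.drop (i+1) := by
  rw [List.drop_eq_getElem_cons h]
  simp [List.getD, List.getElem?_eq_getElem h]

-- extending a slice by one element on the right
lemma pv_take_ext (lines : List String) {a e : Nat} (h1 : a ≤ e) (h2 : e < lines.length) :
    (lines.drop a).take (e - a) ++ [lines.getD e ""] = (lines.drop a).take (e + 1 - a) := by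
  have he : e + 1 - a = (e - a) + 1 := by omega
  rw [he, List.take_succ]
  have : (lines.drop a)[e - a]? = some (lines.getD e "") := by
    rw [List.getElem?_drop]
    have : a + (e - a) = e := by omega
    rw [this]
    simp [List.getD, List.getElem?_eq_getElem h2]
  rw [this]
  rfl

-- pvSplitEnd on a suffix = pvFirstEnd
lemma pvSplitEnd_drop (lines : List String) (j : Nat) :
    pvSplitEnd (lines.drop j) =
      match pvFirstEnd lines j with
      | some e => some ((lines.drop j).take (e - j), lines.getD e "", lines.drop (e+1))
      | none => none := by
  fun_induction pvFirstEnd lines j with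
  | case1 j hj hEnd =>
    rw [pv_drop_cons hj, pvSplitEnd, if_pos hEnd]
    simp
  | case2 j hj hEnd ih =>
    rw [pv_drop_cons hj, pvSplitEnd, if_neg hEnd]
    rw [ih]
    cases hfe : pvFirstEnd lines (j+1) with
    | none => rfl
    | some e =>
      have hb := pvFirstEnd_bounds hfe
      have : e - j = (e - (j+1)) + 1 := by omega
      simp only [Option.map_some]
      rw [this]
      rw [← pv_drop_cons hj]
      rw [pv_drop_cons hj]
      simp
  | case3 j hj =>
    rw [List.drop_eq_nil_of_le (by omega)]
    rfl

-- last-separator splitting distributes over appending one line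
lemma pvSplitSep_append (xs : List String) (l : String) :
    pvSplitSep (xs ++ [l]) =
      if pvIsSep l then some (xs, [])
      else (pvSplitSep xs).map (fun p => (p.1, p.2 ++ [l])) := by
  induction xs with
  | nil =>
    by_cases hl : pvIsSep l <;> simp [pvSplitSep, hl]
  | cons x rest ih =>
    rw [List.cons_append, pvSplitSep, ih]
    by_cases hl : pvIsSep l
    · rw [if_pos hl, if_pos hl]
    · rw [if_neg hl, if_neg hl]
      cases hr : pvSplitSep rest with
      | some p => simp [pvSplitSep, hr]
      | none =>
        simp only [Option.map_none, pvSplitSep, hr]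
        by_cases hx : pvIsSep x <;> simp [hx]

-- pvSplitSep on a slice = pvLastSep
lemma pvSplitSep_slice (lines : List String) (a : Nat) :
    ∀ e, a ≤ e → e ≤ lines.length →
    pvSplitSep ((lines.drop a).take (e - a)) =
      match pvLastSep lines e with
      | some s => if a ≤ s then
          some ((lines.drop a).take (s - a), (lines.drop (s+1)).take (e - (s+1)))
        else none
      | none => none := by
  intro e
  induction e with
  | zero =>
    intro h1 h2
    simp only [Nat.le_zero] at h1
    subst h1
    simp [pvSplitSep, pvLastSep]
  | succ e ih =>
    intro h1 h2
    rcases Nat.lt_or_ge e a with ha | ha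
    · -- a = e + 1: empty slice
      have hae : a = e + 1 := by omega
      subst hae
      simp only [Nat.sub_self, List.take_zero, pvSplitSep]
      cases h : pvLastSep lines (e+1) with
      | none => rfl
      | some s =>
        have := pvLastSep_lt h
        simp [show ¬ e + 1 ≤ s by omega]
    · have heL : e < lines.length := by omega
      have hsl : (lines.drop a).take (e + 1 - a) =
          (lines.drop a).take (e - a) ++ [lines.getD e ""] := (pv_take_ext lines ha heL).symm
      rw [hsl, pvSplitSep_append]
      rw [pvLastSep]
      by_cases hse : pvIsSep (lines.getD e "")
      · have hse' : pvIsSep (lines[e]?.getD "") = true := by simpa only [List.getD] using hse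
        simp [hse', show a ≤ e from by omega, show e + 1 - (e + 1) = 0 from by omega]
      · rw [if_neg hse, if_neg hse]
        rw [ih ha (by omega)]
        cases h : pvLastSep lines e with
        | none => rfl
        | some s =>
          have hslt := pvLastSep_lt h
          by_cases has : a ≤ s
          · have hx := pv_take_ext lines (show s + 1 ≤ e from by omega) heL
            simp only [List.getD] at hx
            simp [has, hx, show e + 1 - (s + 1) = e - s from by omega]
          · simp [has]

-- one-step unfolding of pvGoB without the equation binders
lemma pvGoB_eq (strategy : String) (lines : List String) :
    pvGoB strategy lines =
      match pvSplitStart lines with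
      | none => lines
      | some (before, head, tail) =>
        match pvSplitEnd tail with
        | none => before ++ head :: pvGoB strategy tail
        | some (body, endl, after) =>
          match pvSplitSep body with
          | none => before ++ head :: pvGoB strategy tail
          | some (cur, inc) =>
            before ++
              (if strategy == "accept_current" then cur
               else if strategy == "accept_incoming" then inc
               else if strategy == "auto_merge" then cur ++ inc
               else head :: body ++ [endl]) ++ pvGoB strategy after := by
  rw [pvGoB.eq_def]
  repeat' split
  all_goals first | rfl | simp_all

lemma pvSplitStart_cons_notStart (l : String) (xs : List String) (hl : pvIsStart l = false) :
    pvSplitStart (l :: xs) = (pvSplitStart xs).map (fun p => (l :: p.1, p.2.1, p.2.2)) := by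
  rw [pvSplitStart, if_neg (by simp [hl])]

-- pvGoB on a non-start head just emits it
lemma pvGoB_cons_notStart (strategy : String) (l : String) (xs : List String)
    (hl : pvIsStart l = false) :
    pvGoB strategy (l :: xs) = l :: pvGoB strategy xs := by
  rw [pvGoB_eq strategy (l :: xs), pvGoB_eq strategy xs, pvSplitStart_cons_notStart l xs hl]
  cases hs : pvSplitStart xs with
  | none => simp
  | some p =>
    obtain ⟨b, h, t⟩ := p
    simp only [Option.map_some]
    cases he : pvSplitEnd t with
    | none => simp [he]
    | some q =>
      obtain ⟨body, endl, after⟩ := q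
      cases hsep : pvSplitSep body with
      | none => simp [he, hsep]
      | some r => obtain ⟨c, icm⟩ := r; simp [he, hsep]

-- the main bridge: A's indexed loop on a suffix = B's segment recursion
lemma pvLoop_eq (strategy : String) (lines : List String) :
    ∀ (fuel i : Nat) (acc : List String), lines.length ≤ fuel + i →
    pvLoopA strategy lines fuel i acc = acc ++ pvGoB strategy (lines.drop i) := by
  intro fuel
  induction fuel with
  | zero =>
    intro i acc hle
    rw [pvLoopA, List.drop_eq_nil_of_le (by omega), pvGoB_eq]
    simp [pvSplitStart]
  | succ fuel ih =>
    intro i acc hle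
    rw [pvLoopA]
    by_cases hi : i < lines.length
    · rw [if_pos hi]
      by_cases hst : pvIsStart (lines.getD i "")
      · rw [if_pos hst]
        have hdrop : lines.drop i = lines.getD i "" :: lines.drop (i+1) := pv_drop_cons hi
        have hB : pvGoB strategy (lines.drop i) =
            match pvSplitEnd (lines.drop (i+1)) with
            | none => lines.getD i "" :: pvGoB strategy (lines.drop (i+1))
            | some (body, endl, after) =>
              match pvSplitSep body with
              | none => lines.getD i "" :: pvGoB strategy (lines.drop (i+1))
              | some (cur, inc) =>
                (if strategy == "accept_current" then cur
                 else if strategy == "accept_incoming" then inc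
                 else if strategy == "auto_merge" then cur ++ inc
                 else lines.getD i "" :: body ++ [endl]) ++ pvGoB strategy after := by
          conv_lhs => rw [hdrop, pvGoB_eq]
          rw [pvSplitStart, if_pos hst]
          cases he : pvSplitEnd (lines.drop (i+1)) with
          | none => simp [he]
          | some q =>
            obtain ⟨body, endl, after⟩ := q
            cases hsep : pvSplitSep body with
            | none => simp [he, hsep]
            | some r => obtain ⟨c, icm⟩ := r; simp [he, hsep]
        rw [pvScanA_spec lines (lines.length - (i+1)) (i+1) none (by omega)]
        rw [pvSplitEnd_drop lines (i+1)] at hB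
        cases hfe : pvFirstEnd lines (i+1) with
        | none =>
          rw [hfe] at hB
          simp only at hB
          have hnone :
              (match pvLastSep lines ((none : Option Nat).getD lines.length) with
                | some s => if i + 1 ≤ s then some s else none
                | none => none) = (none : Option Nat) ∨
              ∃ s, (match pvLastSep lines ((none : Option Nat).getD lines.length) with
                | some s => if i + 1 ≤ s then some s else none
                | none => none) = some s := by
            cases pvLastSep lines ((none : Option Nat).getD lines.length) with
            | none => exact Or.inl rfl
            | some s =>
              by_cases hs : i + 1 ≤ s
              · exact Or.inr ⟨s, by simp [hs]⟩
              · exact Or.inl (by simp [hs])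
          rcases hnone with hX | ⟨s, hX⟩ <;>
          · rw [hX]
            rw [ih (i+1) (acc ++ [lines.getD i ""]) (by omega)]
            rw [hB]
            simp
        | some e =>
          rw [hfe] at hB
          have hbe := pvFirstEnd_bounds hfe
          simp only [Option.getD_some] at *
          rw [pvSplitSep_slice lines (i+1) e (by omega) (by omega)] at hB
          cases hls : pvLastSep lines e with
          | none =>
            simp only [hls] at hB ⊢
            rw [ih (i+1) (acc ++ [lines.getD i ""]) (by omega), hB]
            simp
          | some s =>
            simp only [hls] at hB ⊢
            by_cases hs : i + 1 ≤ s
            · simp only [hs, if_true] at hB ⊢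
              rw [ih (e+1) _ (by omega)]
              rw [hB]
              have hman : (lines.drop i).take (e + 1 - i) =
                  lines.getD i "" :: ((lines.drop (i+1)).take (e - (i+1)) ++ [lines.getD e ""]) := by
                rw [pv_drop_cons hi]
                have h3 : e + 1 - i = (e + 1 - (i+1)) + 1 := by omega
                rw [h3, List.take_succ_cons]
                rw [← pv_take_ext lines (by omega : i + 1 ≤ e) (by omega)]
              rw [hman]
              by_cases c1 : strategy == "accept_current"
              · simp [c1]
              · by_cases c2 : strategy == "accept_incoming"
                · simp [c1, c2]
                · by_cases c3 : strategy == "auto_merge"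
                  · simp [c1, c2, c3]
                  · simp [c1, c2, c3]
            · simp only [hs, if_false] at hB ⊢
              rw [ih (i+1) (acc ++ [lines.getD i ""]) (by omega), hB]
              simp
      · rw [if_neg hst]
        rw [ih (i+1) (acc ++ [lines.getD i ""]) (by omega)]
        rw [pv_drop_cons hi, pvGoB_cons_notStart strategy _ _ (by simpa using hst)]
        simp
    · rw [if_neg hi]
      rw [List.drop_eq_nil_of_le (by omega), pvGoB_eq]
      simp [pvSplitStart]

-- ===== VERDICT (by name: the statement is the Claim_ definition above) =====
theorem apply_resolution_strategy_py_spec : Claim_equal_apply_resolution_strategy_py := by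
  intro content conflict strategy _
  unfold Spec_apply_resolution_strategy_py
  unfold apply_resolution_strategy_py apply_resolution_strategy_py_alt
  split_ifs with hg
  · rfl
  · show PySem.Str.join "\n"
        (pvLoopA strategy ((PySem.Str.split? content "\n").getD [])
          ((PySem.Str.split? content "\n").getD []).length 0 []) =
      PySem.Str.join "\n" (pvGoB strategy ((PySem.Str.split? content "\n").getD []))
    rw [pvLoop_eq strategy ((PySem.Str.split? content "\n").getD [])
        ((PySem.Str.split? content "\n").getD []).length 0 [] (by omega)]
    simp
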